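-- pv_equiv track=rewrite | github.com/jmsbutcher/Knowledge-Manager | KnowledgeManager/DocumentManagement/AttributeManagement/content_interface.py | _is_attribute_line
-- ===== SOURCE A (Python) =====
-- def _is_attribute_line(line):
--     """ return True if an identifier is detected """
--     hash_detected = False
--     for ch in line:
--         if ch == '#':
--             hash_detected = True
--         if hash_detected and ch == ':':
--             return True
--     return False
-- ===== SOURCE B (Python) =====
-- def _is_attribute_line(line):
--     """ return True if an identifier is detected """
--     return -1 < line.find('#') < line.rfind(':')
-- ===== Notes on version B (the rewrite author's own statement) =====
-- stated objective: simpler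
-- what changed: Instead of scanning with a hash_detected flag, B reduces the question to an index comparison: the position of the first hash (str.find) must be a real index and lie strictly before the position of the last colon (str.rfind, a right-to-left search); no suffix is scanned or sliced.
import Mathlib
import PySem

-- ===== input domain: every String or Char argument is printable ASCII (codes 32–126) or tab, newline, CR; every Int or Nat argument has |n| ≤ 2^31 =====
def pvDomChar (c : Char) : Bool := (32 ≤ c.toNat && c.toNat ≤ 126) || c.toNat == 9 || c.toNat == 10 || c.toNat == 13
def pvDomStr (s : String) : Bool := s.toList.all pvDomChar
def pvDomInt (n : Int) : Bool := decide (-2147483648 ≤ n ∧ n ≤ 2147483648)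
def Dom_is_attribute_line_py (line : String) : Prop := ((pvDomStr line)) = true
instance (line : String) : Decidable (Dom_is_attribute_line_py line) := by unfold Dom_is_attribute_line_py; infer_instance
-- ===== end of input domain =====

-- B replaces A's flagged char scan by an index comparison: first '#' (find) must lie strictly before last ':' (rfind); objective: simpler.

-- ===== PORT A =====
-- the for-loop over line with the hash_detected flag and the early return
def is_attribute_line_go (hash_detected : Bool) : List Char → Bool
  | [] => false
  | ch :: rest =>
    let hd := if ch = '#' then true else hash_detected
    if hd && ch = ':' then true else is_attribute_line_go hd rest

def is_attribute_line_py (line : String) : Bool :=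
  is_attribute_line_go false line.toList

-- ===== PORT B =====
-- -1 < line.find('#') < line.rfind(':')  (Python chained comparison)
def is_attribute_line_py_alt (line : String) : Bool :=
  let h := PySem.Str.find line "#"
  let c := PySem.Str.rfind line ":"
  (-1 < h && h < c)

-- ===== PRECONDITION & SPEC =====
def Spec_is_attribute_line_py (line : String) (out : Bool) : Prop := out = is_attribute_line_py_alt line
instance (line : String) (out : Bool) : Decidable (Spec_is_attribute_line_py line out) := by unfold Spec_is_attribute_line_py; infer_instance

-- ===== CLAIM (what is proved, stated in full; the proofs are below) =====
def Claim_equal_is_attribute_line_py : Prop := ∀ (line : String), Dom_is_attribute_line_py line → Spec_is_attribute_line_py line (is_attribute_line_py line)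

-- ===== LEMMAS AND PROOFS =====

-- once the flag is set, A just scans for ':'
theorem go_true_eq_contains (l : List Char) :
    is_attribute_line_go true l = l.contains ':' := by
  induction l with
  | nil => rfl
  | cons ch rest ih =>
      by_cases h : ch = ':'
      · simp [is_attribute_line_go, h]
      · simp [is_attribute_line_go, h, ih]
        exact fun e => absurd e.symm h

-- A's loop = "drop everything before the first '#', then look for ':'"
theorem go_false_eq_dropWhile (l : List Char) :
    is_attribute_line_go false l = (l.dropWhile (· ≠ '#')).contains ':' := by
  induction l with
  | nil => rfl
  | cons ch rest ih =>
      by_cases h : ch = '#'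
      · subst h
        simp [is_attribute_line_go, go_true_eq_contains]
      · simp [is_attribute_line_go, h, ih]

theorem singleton_infix_iff_mem (a : Char) (l : List Char) : [a] <:+: l ↔ a ∈ l := by
  constructor
  · intro h; exact h.subset (by simp)
  · intro h
    rcases List.append_of_mem h with ⟨s, t, rfl⟩
    exact ⟨s, t, by simp⟩

-- dropWhile coincides with drop k when positions below k fail the test and position k is '#'
theorem dropWhile_eq_drop_of : ∀ (l : List Char) (k : Nat),
    (∀ i (_hi : i < k) (hil : i < l.length), l[i] ≠ '#') →
    ['#'] <+: l.drop k →
    l.dropWhile (· ≠ '#') = l.drop k := by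
  intro l
  induction l with
  | nil =>
      intro k _ h2
      rcases h2 with ⟨t, ht⟩
      simp at ht
  | cons c rest ih =>
      intro k h1 h2
      cases k with
      | zero =>
          rcases h2 with ⟨t, ht⟩
          simp only [List.drop_zero] at ht ⊢
          have hc : c = '#' := by
            have := congrArg (List.head? ·) ht
            simpa using this.symm
          simp [hc]
      | succ j =>
          have hc : c ≠ '#' := h1 0 (Nat.succ_pos j) (by simp)
          have h1' : ∀ i (_hi : i < j) (hil : i < rest.length), rest[i] ≠ '#' := by
            intro i hi hil
            have := h1 (i + 1) (by omega) (by simp; omega)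
            simpa using this
          have h2' : ['#'] <+: rest.drop j := by simpa using h2
          have hrec := ih j h1' h2'
          simp only [List.drop_succ_cons, List.dropWhile_cons, ne_eq, decide_not]
          rw [if_pos (by simp [hc])]
          simp only [ne_eq, decide_not] at hrec
          exact hrec

-- rfind's backward scan: h < rfind.go s sub k iff some position j ≤ k above h carries sub
theorem rfind_go_lt_iff (s sub : List Char) (h : Int) (hh : -1 ≤ h) :
    ∀ k : Nat, (h < PySem.Chars.rfind.go s sub k ↔ ∃ j : Nat, j ≤ k ∧ h < (j : Int) ∧ sub <+: s.drop j) := by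
  intro k
  induction k with
  | zero =>
      unfold PySem.Chars.rfind.go
      by_cases hp : sub.isPrefixOf s
      · rw [if_pos hp]
        constructor
        · intro hlt; exact ⟨0, le_refl 0, by exact_mod_cast hlt, by simpa [List.isPrefixOf_iff_prefix] using hp⟩
        · rintro ⟨j, hj, hlt, _⟩
          interval_cases j
          exact_mod_cast hlt
      · rw [if_neg hp]
        constructor
        · intro hlt; omega
        · rintro ⟨j, hj, _, hpre⟩
          interval_cases j
          exact absurd (List.isPrefixOf_iff_prefix.mpr hpre) (by simpa using hp)
  | succ k ih =>
      unfold PySem.Chars.rfind.go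
      by_cases hp : sub.isPrefixOf (s.drop (k + 1))
      · rw [if_pos hp]
        constructor
        · intro hlt
          exact ⟨k + 1, le_refl _, by exact_mod_cast hlt, by simpa [List.isPrefixOf_iff_prefix] using hp⟩
        · rintro ⟨j, hj, hlt, _⟩
          have : (j : Int) ≤ (k + 1 : Nat) := by exact_mod_cast hj
          push_cast at this ⊢
          omega
      · rw [if_neg hp]
        rw [ih]
        constructor
        · rintro ⟨j, hj, hlt, hpre⟩; exact ⟨j, by omega, hlt, hpre⟩
        · rintro ⟨j, hj, hlt, hpre⟩
          refine ⟨j, ?_, hlt, hpre⟩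
          rcases Nat.lt_or_ge j (k + 1) with hlt' | hge
          · omega
          · have : j = k + 1 := by omega
            subst this
            exact absurd (List.isPrefixOf_iff_prefix.mpr hpre) (by simpa using hp)

-- the whole equivalence at the list level
theorem key_list (l : List Char) :
    is_attribute_line_go false l
      = (-1 < PySem.Chars.find l ['#'] && PySem.Chars.find l ['#'] < PySem.Chars.rfind l [':']) := by
  rw [go_false_eq_dropWhile]
  by_cases hfind : PySem.Chars.find l ['#'] = -1
  · -- no '#': A's dropWhile consumes everything, B's chained comparison is false
    have hmem : '#' ∉ l := by
      have := (PySem.Chars.find_eq_neg_one_iff l ['#']).mp hfind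
      rw [singleton_infix_iff_mem] at this
      exact this
    have hnil : l.dropWhile (· ≠ '#') = [] := by
      rw [List.dropWhile_eq_nil_iff]
      intro x hx
      simp only [decide_eq_true_eq]
      intro hEq; exact hmem (hEq ▸ hx)
    simp only [ne_eq, decide_not] at hnil
    simp [hnil, hfind]
  · -- '#' at index h = find: A scans from the first '#', B asks rfind(':') > h
    have hnn : 0 ≤ PySem.Chars.find l ['#'] := by
      have := PySem.Chars.neg_one_le_find l ['#']
      omega
    obtain ⟨hpre, hmin⟩ := PySem.Chars.find_spec (s := l) (sub := ['#']) hnn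
    generalize hdef : PySem.Chars.find l ['#'] = h at *
    have hdw : l.dropWhile (· ≠ '#') = l.drop h.toNat := by
      apply dropWhile_eq_drop_of
      · intro j hj hjl hEq
        apply hmin j hj
        exact ⟨l.drop (j + 1), by
          rw [List.drop_eq_getElem_cons hjl]; simp [hEq]⟩
      · exact hpre
    rw [hdw]
    have hld : (l.drop h.toNat).length = l.length - h.toNat := List.length_drop
    have hhl : -1 < h := by omega
    rw [Bool.eq_iff_iff]
    simp only [Bool.and_eq_true, decide_eq_true_eq, List.contains_eq_mem, List.mem_iff_getElem]
    constructor
    · -- a ':' somewhere in drop h → rfind > h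
      rintro ⟨i, hi, hci⟩
      refine ⟨hhl, ?_⟩
      rw [PySem.Chars.rfind, rfind_go_lt_iff l [':'] h (by omega)]
      refine ⟨h.toNat + i, by omega, ?_, ?_⟩
      · -- h < h.toNat + i: need i > 0, since l[h.toNat] = '#' ≠ ':'
        have hih : (l.drop h.toNat)[0]'(by omega) = '#' := by
          rcases hpre with ⟨t, ht⟩
          simp [← ht]
        have hipos : 0 < i := by
          rcases Nat.eq_zero_or_pos i with rfl | hp
          · rw [hih] at hci; exact absurd hci (by decide)
          · exact hp
        omega
      · -- [':'] <+: l.drop (h.toNat + i)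
        have hlen : h.toNat + i < l.length := by omega
        refine ⟨l.drop (h.toNat + i + 1), ?_⟩
        rw [List.drop_eq_getElem_cons hlen]
        have hgl : l[h.toNat + i]'hlen = ':' := by
          rw [← List.getElem_drop]; exact hci
        rw [hgl]; rfl
    · -- rfind > h → a ':' from position > h, hence inside drop h
      rintro ⟨_, hcmp⟩
      rw [PySem.Chars.rfind, rfind_go_lt_iff l [':'] h (by omega)] at hcmp
      rcases hcmp with ⟨j, _, hjgt, hprej⟩
      have hjh : h.toNat < j := by omega
      have hjlen : j < l.length := by
        rcases hprej with ⟨t, ht⟩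
        by_contra hge
        rw [List.drop_eq_nil_of_le (by omega)] at ht
        simp at ht
      have hcj : l[j] = ':' := by
        rcases hprej with ⟨t, ht⟩
        rw [List.drop_eq_getElem_cons hjlen] at ht
        exact (Option.some.inj (congrArg List.head? ht)).symm
      refine ⟨j - h.toNat, by omega, ?_⟩
      simp only [List.getElem_drop, Nat.add_sub_cancel' hjh.le]
      exact hcj

-- ===== VERDICT (by name: the statement is the Claim_ definition above) =====
theorem is_attribute_line_py_spec : Claim_equal_is_attribute_line_py := by
  unfold Claim_equal_is_attribute_line_py Spec_is_attribute_line_py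
  intro line _
  unfold is_attribute_line_py is_attribute_line_py_alt
  simp only [PySem.Str.find_eq, PySem.Str.rfind_eq]
  exact key_list line.toList
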